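-- pv_equiv track=rewrite | github.com/youuyk/fconf | LogPreprocessing/lognroll_actual.py | get_bracket_char
-- ===== SOURCE A (Python) =====
-- def get_bracket_char(log):
--     pos = len(log)
--     bkt_open = None
--     bkt_close = None
--     # quote and double-quote are treated like parentheses, but since there is no left and right, it is handled differently in the if statement in Custom_split.
--     bkt_pair = {"(":")","{":"}","[":"]","<":">","'":"'","\"":"\""}
--
--     for c in "({[<'\"":
--         loc = log.find(c)
--         if loc>=0 and loc<pos:
--             pos = loc
--             bkt_open = c
--             bkt_close = bkt_pair[c]
--     return bkt_open, bkt_close, pos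
-- ===== SOURCE B (Python) =====
-- def get_bracket_char(log):
--     bkt_pair = {"(":")","{":"}","[":"]","<":">","'":"'","\"":"\""}
--     for i, ch in enumerate(log):
--         if ch in bkt_pair:
--             return ch, bkt_pair[ch], i
--     return None, None, len(log)
-- ===== Notes on version B (the rewrite author's own statement) =====
-- stated objective: simpler
-- what changed: Replaces six separate log.find scans folded into a running minimum with one left-to-right enumerate pass that returns at the first character found in the bracket dict (len(log) sentinel when none).
import Mathlib
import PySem

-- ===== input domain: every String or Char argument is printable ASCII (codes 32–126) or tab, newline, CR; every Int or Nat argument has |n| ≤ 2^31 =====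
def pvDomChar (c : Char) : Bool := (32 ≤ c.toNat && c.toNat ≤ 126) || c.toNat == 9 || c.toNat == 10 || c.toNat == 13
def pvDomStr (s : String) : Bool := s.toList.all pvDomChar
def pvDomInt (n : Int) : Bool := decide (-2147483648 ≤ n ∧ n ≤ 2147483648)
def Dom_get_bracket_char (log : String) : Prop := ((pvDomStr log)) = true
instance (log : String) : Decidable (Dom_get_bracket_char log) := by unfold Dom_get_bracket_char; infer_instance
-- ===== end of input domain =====

-- B replaces A's six repeated log.find scans by a single left-to-right pass that
-- returns at the first bracket/quote character (simpler; same results).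

-- ===== PORT A =====
def pvBktPairA : PySem.Dict String String :=
  PySem.Dict.ofList [("(",")"),("{","}"),("[","]"),("<",">"),("'","'"),("\"","\"")]

-- loop body of A's 'for c in "({[<'\""' (f is A's 'log.find' applied to the one-char string)
def pvAStep (f : Char → Int) (st : Int × Option String × Option String) (c : Char) :
    Int × Option String × Option String :=
  let loc := f c
  if loc ≥ 0 ∧ loc < st.1 then (loc, some (String.ofList [c]), pvBktPairA.get? (String.ofList [c]))
  else st

def get_bracket_char (log : String) : Option String × Option String × Int :=
  let st := "({[<'\"".toList.foldl
    (pvAStep (fun c => PySem.Str.find log (String.ofList [c])))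
    ((PySem.Str.len log : Int), none, none)
  (st.2.1, st.2.2, st.1)

-- ===== PORT B =====
def pvBktPairB : PySem.Dict String String :=
  PySem.Dict.ofList [("(",")"),("{","}"),("[","]"),("<",">"),("'","'"),("\"","\"")]

-- 'for i, ch in enumerate(log): if ch in bkt_pair: return ch, bkt_pair[ch], i'
def pvBGo : List Char → Nat → Option (String × String × Nat)
  | [], _ => none
  | c :: rest, i =>
    match pvBktPairB.get? (String.ofList [c]) with
    | some cl => some (String.ofList [c], cl, i)
    | none => pvBGo rest (i + 1)

def get_bracket_char_alt (log : String) : Option String × Option String × Int :=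
  match pvBGo log.toList 0 with
  | some (o, cl, i) => (some o, some cl, (i : Int))
  | none => (none, none, (PySem.Str.len log : Int))

-- ===== PRECONDITION & SPEC =====
def Spec_get_bracket_char (log : String) (out : Option String × Option String × Int) : Prop := out = get_bracket_char_alt log
instance (log : String) (out : Option String × Option String × Int) : Decidable (Spec_get_bracket_char log out) := by unfold Spec_get_bracket_char; infer_instance

-- ===== CLAIM (what is proved, stated in full; the proofs are below) =====
def Claim_equal_get_bracket_char : Prop := ∀ (log : String), Dom_get_bracket_char log → Spec_get_bracket_char log (get_bracket_char log)

-- ===== LEMMAS AND PROOFS =====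

-- the six bracket/quote characters, in A's iteration order
def pvBkts : List Char := ['(', '{', '[', '<', '\'', '"']

-- the common "first bracket, by position" shape both programs compute
def pvCanon : List Char → Option String × Option String × Int
  | [] => (none, none, 0)
  | c :: L =>
    match pvBktPairB.get? (String.ofList [c]) with
    | some cl => (some (String.ofList [c]), some cl, 0)
    | none => let r := pvCanon L; (r.1, r.2.1, r.2.2 + 1)

lemma pvBeqSingle (a c : Char) :
    (String.ofList [a] == String.ofList [c]) = decide (a = c) := by
  rw [Bool.eq_iff_iff, beq_iff_eq, decide_eq_true_iff, String.ofList_inj]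
  simp

-- dict lookup on a one-character key, in closed form
lemma pvGet?_bkt (c : Char) :
    pvBktPairB.get? (String.ofList [c]) =
      if c = '(' then some ")" else if c = '{' then some "}" else if c = '[' then some "]"
      else if c = '<' then some ">" else if c = '\'' then some "'" else if c = '"' then some "\""
      else none := by
  rw [show pvBktPairB = PySem.Dict.mk [("(",")"),("{","}"),("[","]"),("<",">"),("'","'"),("\"","\"")] from by decide]
  simp only [PySem.Dict.get?_mk_cons,
    show ("(" : String) = String.ofList ['('] from rfl, show ("{" : String) = String.ofList ['{'] from rfl,
    show ("[" : String) = String.ofList ['['] from rfl, show ("<" : String) = String.ofList ['<'] from rfl,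
    show ("'" : String) = String.ofList ['\''] from rfl, show ("\"" : String) = String.ofList ['"'] from rfl,
    pvBeqSingle]
  rw [show ∀ s : String, (PySem.Dict.mk ([] : List (String × String))).get? s = none from fun s => rfl]
  by_cases h1 : '(' = c <;> by_cases h2 : '{' = c <;> by_cases h3 : '[' = c <;>
    by_cases h4 : '<' = c <;> by_cases h5 : '\'' = c <;> by_cases h6 : '"' = c <;>
    simp_all [eq_comm]

-- [b] is a prefix of L.drop i iff L[i]? = some b
lemma pvPrefixSingle (b : Char) (L : List Char) (i : Nat) :
    [b] <+: L.drop i ↔ L[i]? = some b := by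
  rw [← List.head?_drop]
  cases h : L.drop i <;> simp [List.prefix_cons_iff, eq_comm]

-- first occurrence of a single char: find = n when L[n] = b and no earlier b
lemma pvFindSingleEq (L : List Char) (b : Char) (n : Nat)
    (h1 : L[n]? = some b) (h2 : ∀ i < n, L[i]? ≠ some b) :
    PySem.Chars.find L [b] = (n : Int) := by
  have hinf : [b] <:+: L := by
    rw [← PySem.Chars.isIn_iff_infix, ← PySem.Chars.exists_prefix_drop_iff_isIn]
    exact ⟨n, (pvPrefixSingle b L n).2 h1⟩
  have hnn : 0 ≤ PySem.Chars.find L [b] := (PySem.Chars.find_nonneg_iff _ _).2 hinf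
  obtain ⟨hpre, hmin⟩ := PySem.Chars.find_spec (s := L) (sub := [b]) hnn
  set m := (PySem.Chars.find L [b]).toNat with hm
  have hLm : L[m]? = some b := (pvPrefixSingle b L m).1 hpre
  have hmn : m = n := by
    rcases lt_trichotomy m n with h | h | h
    · exact absurd hLm (h2 m h)
    · exact h
    · exact absurd ((pvPrefixSingle b L n).2 h1) (hmin n h)
  omega

-- how a single-char find evolves under cons
lemma pvFindSingleCons (c b : Char) (L : List Char) :
    PySem.Chars.find (c :: L) [b] =
      if b = c then 0
      else if PySem.Chars.find L [b] = -1 then -1 else PySem.Chars.find L [b] + 1 := by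
  by_cases hbc : b = c
  · subst hbc
    rw [if_pos rfl]
    exact pvFindSingleEq (b :: L) b 0 rfl (by omega)
  · rw [if_neg hbc]
    by_cases hnone : PySem.Chars.find L [b] = -1
    · rw [if_pos hnone]
      have hmem : b ∉ L := by
        have := (PySem.Chars.find_eq_neg_one_iff L [b]).1 hnone
        rw [← PySem.Chars.isIn_iff_infix, ← PySem.Chars.exists_prefix_drop_iff_isIn] at this
        intro hb
        obtain ⟨i, hi⟩ := List.mem_iff_getElem?.1 hb
        exact this ⟨i, (pvPrefixSingle b L i).2 hi⟩
      apply (PySem.Chars.find_eq_neg_one_iff _ _).2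
      rw [← PySem.Chars.isIn_iff_infix, ← PySem.Chars.exists_prefix_drop_iff_isIn]
      rintro ⟨j, hj⟩
      have := (pvPrefixSingle b (c :: L) j).1 hj
      rcases j with _ | j
      · simp at this; exact hbc this.symm
      · simp at this; exact hmem (List.mem_iff_getElem?.2 ⟨j, this⟩)
    · rw [if_neg hnone]
      have hnn : 0 ≤ PySem.Chars.find L [b] := by
        have := PySem.Chars.neg_one_le_find L [b]; omega
      obtain ⟨hpre, hmin⟩ := PySem.Chars.find_spec (s := L) (sub := [b]) hnn
      set m := (PySem.Chars.find L [b]).toNat with hm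
      have : PySem.Chars.find (c :: L) [b] = ((m + 1 : Nat) : Int) := by
        apply pvFindSingleEq
        · simpa using (pvPrefixSingle b L m).1 hpre
        · intro i hi
          rcases i with _ | i
          · simp; intro h; exact hbc h.symm
          · simp only [List.getElem?_cons_succ]
            intro h
            exact hmin i (by omega) ((pvPrefixSingle b L i).2 h)
      rw [this]; push_cast; omega

-- fold from pos = 0 never updates
lemma pvFoldZero (g : Char → Int) (cs : List Char) (o cl : Option String) :
    cs.foldl (pvAStep g) (0, o, cl) = (0, o, cl) := by
  induction cs with
  | nil => rfl
  | cons b cs ih =>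
    simp only [List.foldl_cons, pvAStep]
    rw [if_neg (by omega)]
    exact ih

-- fold over chars whose find is never 0 keeps pos ≥ 1
lemma pvFoldPosPos (g : Char → Int) (cs : List Char)
    (h : ∀ b ∈ cs, g b ≠ 0) (st : Int × Option String × Option String) (hp : 1 ≤ st.1) :
    1 ≤ (cs.foldl (pvAStep g) st).1 := by
  induction cs generalizing st with
  | nil => exact hp
  | cons b cs ih =>
    simp only [List.foldl_cons]
    apply ih (fun x hx => h x (List.mem_cons_of_mem _ hx))
    simp only [pvAStep]
    split_ifs with hcond
    · have := h b (List.mem_cons_self ..); omega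
    · exact hp

-- the winner lemma: the unique char with find = 0 determines the whole fold
lemma pvFoldWinner (g : Char → Int) (pre post : List Char) (c : Char)
    (hpre : ∀ b ∈ pre, g b ≠ 0) (hc : g c = 0)
    (p : Int) (hp : 1 ≤ p) (o cl : Option String) :
    (pre ++ c :: post).foldl (pvAStep g) (p, o, cl) =
      (0, some (String.ofList [c]), pvBktPairA.get? (String.ofList [c])) := by
  rw [List.foldl_append]
  have h1 : 1 ≤ ((pre.foldl (pvAStep g) (p, o, cl))).1 := pvFoldPosPos g pre hpre _ hp
  set st1 := pre.foldl (pvAStep g) (p, o, cl)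
  simp only [List.foldl_cons, pvAStep, hc]
  rw [if_pos (by constructor <;> omega)]
  exact pvFoldZero g post _ _

-- shifting every find by one position shifts the fold's pos by one
lemma pvFoldShift (f g : Char → Int) (cs : List Char)
    (hg : ∀ b ∈ cs, g b = if f b = -1 then -1 else f b + 1)
    (hf : ∀ b ∈ cs, -1 ≤ f b) (p : Int) (o cl : Option String) :
    cs.foldl (pvAStep g) (p + 1, o, cl) =
      ((cs.foldl (pvAStep f) (p, o, cl)).1 + 1,
       (cs.foldl (pvAStep f) (p, o, cl)).2) := by
  induction cs generalizing p o cl with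
  | nil => rfl
  | cons b cs ih =>
    have hgb := hg b (List.mem_cons_self ..)
    have hfb := hf b (List.mem_cons_self ..)
    have ih' := ih (fun x hx => hg x (List.mem_cons_of_mem _ hx)) (fun x hx => hf x (List.mem_cons_of_mem _ hx))
    simp only [List.foldl_cons, pvAStep]
    by_cases hcond : f b ≥ 0 ∧ f b < p
    · rw [if_pos hcond, if_pos (by rw [hgb]; split_ifs with h <;> omega)]
      rw [hgb, if_neg (by omega)]
      exact ih' _ _ _
    · rw [if_neg hcond, if_neg (by rw [hgb]; split_ifs with h <;> omega)]
      exact ih' _ _ _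

-- A's fold, on the character list
def pvAFold (L : List Char) : Int × Option String × Option String :=
  pvBkts.foldl (pvAStep (fun c => PySem.Chars.find L [c])) ((L.length : Int), none, none)

-- one winner case of pvACanon: pvBkts split around the head char c
lemma pvWinCase (c : Char) (L pre post : List Char)
    (hsplit : pvBkts = pre ++ c :: post) (hpre : ∀ b ∈ pre, b ≠ c) :
    pvAFold (c :: L) = (0, some (String.ofList [c]), pvBktPairA.get? (String.ofList [c])) := by
  rw [pvAFold, hsplit]
  apply pvFoldWinner
  · intro b hb
    rw [pvFindSingleCons c b L, if_neg (hpre b hb)]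
    have := PySem.Chars.neg_one_le_find L [b]
    split_ifs with h <;> omega
  · rw [pvFindSingleCons c c L, if_pos rfl]
  · simp

set_option maxRecDepth 4096 in
lemma pvACanon (L : List Char) :
    pvAFold L = ((pvCanon L).2.2, (pvCanon L).1, (pvCanon L).2.1) := by
  induction L with
  | nil => decide
  | cons c L ih =>
    by_cases hmem : c ∈ pvBkts
    · have hget : (pvBktPairB.get? (String.ofList [c])).isSome := by
        rw [pvGet?_bkt]
        simp [pvBkts] at hmem
        rcases hmem with h | h | h | h | h | h <;> subst h <;> decide
      have hwin : pvAFold (c :: L) = (0, some (String.ofList [c]), pvBktPairA.get? (String.ofList [c])) := by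
        simp [pvBkts] at hmem
        rcases hmem with h | h | h | h | h | h <;> subst h
        · exact pvWinCase _ L [] ['{', '[', '<', '\'', '"'] (by decide) (by intro b hb; fin_cases hb)
        · exact pvWinCase _ L ['('] ['[', '<', '\'', '"'] (by decide) (by intro b hb; fin_cases hb; decide)
        · exact pvWinCase _ L ['(', '{'] ['<', '\'', '"'] (by decide) (by intro b hb; fin_cases hb <;> decide)
        · exact pvWinCase _ L ['(', '{', '['] ['\'', '"'] (by decide) (by intro b hb; fin_cases hb <;> decide)
        · exact pvWinCase _ L ['(', '{', '[', '<'] ['"'] (by decide) (by intro b hb; fin_cases hb <;> decide)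
        · exact pvWinCase _ L ['(', '{', '[', '<', '\''] [] (by decide) (by intro b hb; fin_cases hb <;> decide)
      rw [hwin, pvCanon]
      obtain ⟨cl, hcl⟩ := Option.isSome_iff_exists.1 hget
      rw [hcl]
      simp [show pvBktPairA = pvBktPairB from rfl, hcl]
    · have hget : pvBktPairB.get? (String.ofList [c]) = none := by
        rw [pvGet?_bkt]
        simp [pvBkts] at hmem
        obtain ⟨h1, h2, h3, h4, h5, h6⟩ := hmem
        simp [h1, h2, h3, h4, h5, h6]
      have hshift : pvAFold (c :: L) = ((pvAFold L).1 + 1, (pvAFold L).2) := by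
        rw [pvAFold, pvAFold, show ((c :: L).length : Int) = (L.length : Int) + 1 from by push_cast [List.length_cons]; ring]
        apply pvFoldShift
        · intro b hb
          apply pvFindSingleCons c b L |>.trans
          rw [if_neg (by rintro rfl; exact hmem hb)]
        · intro b _
          exact PySem.Chars.neg_one_le_find L [b]
      rw [hshift, ih, pvCanon, hget]

lemma pvBCanon (L : List Char) :
    (match pvBGo L 0 with
      | some (o, cl, i) => (some o, some cl, (i : Int))
      | none => (none, none, (L.length : Int))) = pvCanon L := by
  have hstep : ∀ (M : List Char) (i : Nat), pvBGo M (i + 1) =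
      (pvBGo M i).map (fun t => (t.1, t.2.1, t.2.2 + 1)) := by
    intro M
    induction M with
    | nil => intro i; rfl
    | cons c M ih =>
      intro i
      rw [pvBGo, pvBGo]
      cases hget : pvBktPairB.get? (String.ofList [c]) with
      | some cl => rfl
      | none => exact ih (i + 1)
  induction L with
  | nil => rfl
  | cons c L ih =>
    rw [pvCanon]
    cases hget : pvBktPairB.get? (String.ofList [c]) with
    | some cl => rw [pvBGo, hget]; rfl
    | none =>
      rw [pvBGo, hget, show (0 : Nat) + 1 = 0 + 1 from rfl, hstep L 0]
      cases h0 : pvBGo L 0 with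
      | some t =>
        obtain ⟨o, cl, i⟩ := t
        rw [h0] at ih
        simp only [Option.map_some]
        rw [← ih]
        push_cast
        rfl
      | none =>
        rw [h0] at ih
        simp only [Option.map_none]
        rw [← ih]
        push_cast [List.length_cons]
        rfl

-- ===== VERDICT (by name: the statement is the Claim_ definition above) =====
theorem get_bracket_char_spec : Claim_equal_get_bracket_char := by
  intro log _
  unfold Spec_get_bracket_char
  have hA : get_bracket_char log =
      ((pvAFold log.toList).2.1, (pvAFold log.toList).2.2, (pvAFold log.toList).1) := by
    have hfun : (fun c => PySem.Str.find log (String.ofList [c])) =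
        (fun c => PySem.Chars.find log.toList [c]) := by
      funext c; simp
    rw [get_bracket_char, pvAFold, show "({[<'\"".toList = pvBkts from by decide, hfun,
      show (PySem.Str.len log : Int) = (log.toList.length : Int) from by simp]
  have hB : get_bracket_char_alt log =
      (match pvBGo log.toList 0 with
        | some (o, cl, i) => (some o, some cl, (i : Int))
        | none => (none, none, (log.toList.length : Int))) := by
    rw [get_bracket_char_alt, show (PySem.Str.len log : Int) = (log.toList.length : Int) from by simp]
  rw [hA, hB, pvBCanon, pvACanon]
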